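-- pv_equiv track=rewrite | github.com/Jpscarone/ProyectoGarmin | app/services/dashboard_service.py | _trim_dashboard_health_text
-- ===== SOURCE A (Python) =====
-- def _trim_dashboard_health_text(value: str | None) -> str:
--     if not value:
--         return ""
--     normalized = " ".join(value.split())
--     sentences: list[str] = []
--     buffer = ""
--     for char in normalized:
--         buffer += char
--         if char in ".!?":
--             cleaned = buffer.strip()
--             if cleaned:
--                 sentences.append(cleaned)
--             buffer = ""
--         if len(sentences) == 2:
--             break
--     if len(sentences) < 2 and buffer.strip():
--         sentences.append(buffer.strip())
--     trimmed = " ".join(sentences[:2]).strip()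
--     if len(trimmed) > 170:
--         trimmed = trimmed[:167].rstrip(" ,;") + "..."
--     return trimmed
-- ===== SOURCE B (Python) =====
-- def _split_first_sentence(text):
--     """Split off the text up to and including the first '.', '!' or '?'."""
--     cuts = [i for i in (text.find(t) for t in ".!?") if i != -1]
--     if not cuts:
--         return None, text
--     cut = min(cuts) + 1
--     return text[:cut].strip(), text[cut:]
--
--
-- def _trim_dashboard_health_text(value):
--     if not value:
--         return ""
--     rest = " ".join(value.split())
--     sentences = []
--     while len(sentences) < 2:
--         sentence, rest = _split_first_sentence(rest)
--         if sentence is None: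
--             tail = rest.strip()
--             if tail:
--                 sentences.append(tail)
--             break
--         sentences.append(sentence)
--     trimmed = " ".join(sentences)
--     if len(trimmed) > 170:
--         trimmed = trimmed[:167].rstrip(" ,;") + "..."
--     return trimmed
-- ===== Notes on version B (the rewrite author's own statement) =====
-- stated objective: faster
-- what changed: A accumulates a character-by-character buffer with an early break to collect the first two sentences; B instead repeatedly finds the earliest terminator ('.','!','?') via str.find and splits the string by slicing, appending the stripped leftover when fewer than two sentences exist, with the same 170-char trimming.
import Mathlib
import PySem

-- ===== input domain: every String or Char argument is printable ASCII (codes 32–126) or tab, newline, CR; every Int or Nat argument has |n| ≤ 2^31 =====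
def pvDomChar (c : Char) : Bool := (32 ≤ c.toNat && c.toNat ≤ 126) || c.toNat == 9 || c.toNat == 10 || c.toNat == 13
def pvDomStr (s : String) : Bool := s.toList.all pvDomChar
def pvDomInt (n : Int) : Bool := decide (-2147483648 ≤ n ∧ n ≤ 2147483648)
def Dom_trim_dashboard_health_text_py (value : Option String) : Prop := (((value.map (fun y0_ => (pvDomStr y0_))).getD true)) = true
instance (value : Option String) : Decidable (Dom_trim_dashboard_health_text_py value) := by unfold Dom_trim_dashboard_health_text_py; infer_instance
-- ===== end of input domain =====

-- B replaces A's char-by-char buffer scan with repeated find-the-first-terminator / slice splitting (objective: faster by a constant factor, measured).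

-- shared by both ports: hand port of Python's s.rstrip(" ,;") (exact: drops trailing chars of the set), a line both sources contain verbatim
def pvRstripPunct (l : List Char) : List Char :=
  (l.reverse.dropWhile (fun c => ([' ', ',', ';'] : List Char).contains c)).reverse

-- ===== PORT A =====
-- the for-loop over normalized: state (sentences, buffer); returns at break (len(sentences) == 2) or at end of string
def pvALoop : List Char → List (List Char) → List Char → List (List Char) × List Char
  | [], ss, buf => (ss, buf)
  | ch :: cs, ss, buf =>
    let buf' := buf ++ [ch]
    let st :=
      if (['.', '!', '?'] : List Char).contains ch then
        let cleaned := PySem.Chars.strip buf'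
        ((if cleaned = [] then ss else ss ++ [cleaned]), ([] : List Char))
      else (ss, buf')
    if st.1.length = 2 then st else pvALoop cs st.1 st.2

def trim_dashboard_health_text_py (value : Option String) : String :=
  match value with
  | none => ""
  | some v =>
    if v.toList = [] then "" else
    let normalized := PySem.Chars.join [' '] (PySem.Chars.split₀ v.toList)
    let st := pvALoop normalized [] []
    let sentences :=
      if st.1.length < 2 ∧ PySem.Chars.strip st.2 ≠ [] then st.1 ++ [PySem.Chars.strip st.2] else st.1
    let trimmed := PySem.Chars.strip (PySem.Chars.join [' '] (PySem.List.slice sentences none (some 2)))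
    String.ofList (if 170 < trimmed.length then pvRstripPunct (PySem.List.slice trimmed none (some 167)) ++ ['.', '.', '.'] else trimmed)

-- ===== PORT B =====
-- _split_first_sentence: find the earliest '.', '!' or '?'; cut the sentence off, return the remainder
def pvSplitFirst (text : List Char) : Option (List Char) × List Char :=
  let cuts := ([PySem.Chars.find text ['.'], PySem.Chars.find text ['!'], PySem.Chars.find text ['?']].filter (fun i => i ≠ -1))
  match cuts with
  | [] => (none, text)
  | x :: xs =>
    let cut := xs.foldl min x + 1
    (some (PySem.Chars.strip (PySem.List.slice text none (some cut))), PySem.List.slice text (some cut) none)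

-- the while-loop: n = 2 - len(sentences) slots still free; appends sentences, breaks when no terminator is left
def pvBLoop : Nat → List Char → List (List Char)
  | 0, _ => []
  | n + 1, rest =>
    match pvSplitFirst rest with
    | (none, r) => let tail := PySem.Chars.strip r; if tail = [] then [] else [tail]
    | (some s, r) => s :: pvBLoop n r

def trim_dashboard_health_text_py_alt (value : Option String) : String :=
  match value with
  | none => ""
  | some v =>
    if v.toList = [] then "" else
    let rest := PySem.Chars.join [' '] (PySem.Chars.split₀ v.toList)
    let sentences := pvBLoop 2 rest
    let trimmed := PySem.Chars.join [' '] sentences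
    String.ofList (if 170 < trimmed.length then pvRstripPunct (PySem.List.slice trimmed none (some 167)) ++ ['.', '.', '.'] else trimmed)

-- ===== PRECONDITION & SPEC =====
-- ===== PRECONDITION & SPEC =====
def Spec_trim_dashboard_health_text_py (value : Option String) (out : String) : Prop := out = trim_dashboard_health_text_py_alt value
instance (value : Option String) (out : String) : Decidable (Spec_trim_dashboard_health_text_py value out) := by unfold Spec_trim_dashboard_health_text_py; infer_instance

-- ===== CLAIM (what is proved, stated in full; the proofs are below) =====
def Claim_equal_trim_dashboard_health_text_py : Prop := ∀ (value : Option String), Dom_trim_dashboard_health_text_py value → Spec_trim_dashboard_health_text_py value (trim_dashboard_health_text_py value)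

-- ===== LEMMAS AND PROOFS =====

theorem pv_strip_eq_nil (l : List Char) (h : PySem.Chars.strip l = []) :
    ∀ c ∈ l, PySem.Chars.isspace c = true := by
  intro c hc
  simp [PySem.Chars.strip, PySem.Chars.lstrip, PySem.Chars.rstrip] at h
  have hl : l = l.takeWhile PySem.Chars.isspace ++ l.dropWhile PySem.Chars.isspace :=
    (List.takeWhile_append_dropWhile).symm
  rcases List.mem_append.mp (hl ▸ hc) with h3 | h3
  · exact List.mem_takeWhile_imp h3
  · exact h c h3

theorem pv_strip_ne_nil {c : Char} {l : List Char} (hc : c ∈ l)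
    (h : PySem.Chars.isspace c = false) : PySem.Chars.strip l ≠ [] := by
  intro hnil
  have := pv_strip_eq_nil l hnil c hc
  simp [this] at h

theorem pv_strip_fix {q : List Char}
    (hh : ∃ c t, q = c :: t ∧ PySem.Chars.isspace c = false)
    (hl : ∃ s d, q = s ++ [d] ∧ PySem.Chars.isspace d = false) :
    PySem.Chars.strip q = q := by
  obtain ⟨c, t, rfl, hc⟩ := hh
  obtain ⟨s, d, hq, hd⟩ := hl
  have h1 : PySem.Chars.lstrip (c :: t) = c :: t := by
    simp [PySem.Chars.lstrip, hc]
  rw [PySem.Chars.strip, h1, PySem.Chars.rstrip, hq]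
  have : (s ++ [d]).reverse = d :: s.reverse := by simp
  rw [this]
  simp [hd]

theorem pv_dropWhile_head (p : α → Bool) (l : List α) (h : l.dropWhile p ≠ []) :
    ∃ c t, l.dropWhile p = c :: t ∧ p c = false := by
  obtain ⟨c, t, hct⟩ := List.exists_cons_of_ne_nil h
  have := List.head_dropWhile_not p h
  refine ⟨c, t, hct, ?_⟩
  have h2 : (l.dropWhile p).head h = c := by simp [hct]
  rw [h2] at this
  simpa using this

theorem pv_last_strip (l : List Char) (h : PySem.Chars.strip l ≠ []) :
    ∃ s d, PySem.Chars.strip l = s ++ [d] ∧ PySem.Chars.isspace d = false := by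
  rw [PySem.Chars.strip, PySem.Chars.rstrip] at h ⊢
  set m := PySem.Chars.lstrip l with hm
  have hne : m.reverse.dropWhile PySem.Chars.isspace ≠ [] := by
    intro h0; rw [h0] at h; exact h rfl
  obtain ⟨e, u, heu, hef⟩ := pv_dropWhile_head PySem.Chars.isspace m.reverse hne
  exact ⟨u.reverse, e, by rw [heu]; simp, hef⟩

theorem pv_head_strip (l : List Char) (h : PySem.Chars.strip l ≠ []) :
    ∃ c t, PySem.Chars.strip l = c :: t ∧ PySem.Chars.isspace c = false := by
  rw [PySem.Chars.strip, PySem.Chars.rstrip] at h ⊢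
  set m := PySem.Chars.lstrip l with hm
  obtain ⟨c, t, hct⟩ := List.exists_cons_of_ne_nil h
  refine ⟨c, t, hct, ?_⟩
  -- (rstrip m) is a prefix of m, so c is the head of m = dropWhile isspace l
  have hpre : (m.reverse.dropWhile PySem.Chars.isspace).reverse <+: m := by
    obtain ⟨pre, hpre⟩ := List.dropWhile_suffix (l := m.reverse) PySem.Chars.isspace
    refine ⟨pre.reverse, ?_⟩
    have := congrArg List.reverse hpre
    simpa using this
  rw [hct] at hpre
  obtain ⟨r, hr⟩ := hpre
  have hmne : m ≠ [] := by intro h0; rw [h0] at hr; simp at hr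
  obtain ⟨c', t', hct', hcf⟩ := pv_dropWhile_head PySem.Chars.isspace l hmne
  rw [hm, PySem.Chars.lstrip] at hr
  rw [hct'] at hr
  have : c = c' := by
    have := congrArg (fun x => x.head?) hr
    simpa using this
  rw [this]; exact hcf

theorem pv_strip_strip (l : List Char) : PySem.Chars.strip (PySem.Chars.strip l) = PySem.Chars.strip l := by
  by_cases h : PySem.Chars.strip l = []
  · rw [h]; rfl
  · exact pv_strip_fix (pv_head_strip l h) (pv_last_strip l h)

theorem pv_strip_join2 {a b : List Char} (ha : a ≠ []) (hfa : PySem.Chars.strip a = a)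
    (hb : b ≠ []) (hfb : PySem.Chars.strip b = b) :
    PySem.Chars.strip (a ++ ' ' :: b) = a ++ ' ' :: b := by
  apply pv_strip_fix
  · obtain ⟨c, t, hct, hc⟩ := pv_head_strip a (by rw [hfa]; exact ha)
    rw [hfa] at hct
    exact ⟨c, t ++ ' ' :: b, by rw [hct]; simp, hc⟩
  · obtain ⟨s, d, hsd, hd⟩ := pv_last_strip b (by rw [hfb]; exact hb)
    rw [hfb] at hsd
    exact ⟨a ++ ' ' :: s, d, by rw [hsd]; simp, hd⟩

theorem pv_singleton_prefix {c : Char} {l : List Char} : [c] <+: l ↔ l.head? = some c := by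
  constructor
  · rintro ⟨t, rfl⟩; rfl
  · intro h
    cases l with
    | nil => simp at h
    | cons a t => simp at h; subst h; exact ⟨t, rfl⟩

theorem pv_find_absent {c : Char} {l : List Char} (h : c ∉ l) : PySem.Chars.find l [c] = -1 := by
  rw [PySem.Chars.find_eq_neg_one_iff]
  rw [List.singleton_infix_iff]
  exact h

theorem pv_find_append {c : Char} {buf cs : List Char} (h : c ∉ buf) :
    PySem.Chars.find (buf ++ c :: cs) [c] = (buf.length : Int) := by
  have hinf : [c] <:+: (buf ++ c :: cs) := by
    rw [List.singleton_infix_iff]; simp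
  have hne : PySem.Chars.find (buf ++ c :: cs) [c] ≠ -1 := (PySem.Chars.find_ne_neg_one_iff _ _).mpr hinf
  have hge : 0 ≤ PySem.Chars.find (buf ++ c :: cs) [c] := by
    have := PySem.Chars.neg_one_le_find (buf ++ c :: cs) [c]; omega
  obtain ⟨hpre, hmin⟩ := PySem.Chars.find_spec (s := buf ++ c :: cs) (sub := [c]) hge
  set k := (PySem.Chars.find (buf ++ c :: cs) [c]).toNat with hk
  have hkl : (buf ++ c :: cs)[k]? = some c := by
    rw [← List.head?_drop]; exact pv_singleton_prefix.mp hpre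
  have hknb : ¬ k < buf.length := by
    intro hlt
    rw [List.getElem?_append_left hlt] at hkl
    exact h (List.mem_of_getElem? hkl)
  have hkle : k ≤ buf.length := by
    by_contra hgt
    exact hmin buf.length (by omega) (pv_singleton_prefix.mpr (by rw [List.head?_drop, List.getElem?_append_right (by omega)]; simp))
  have : k = buf.length := by omega
  omega

theorem pv_find_append_other {t c : Char} {buf cs : List Char} (h : t ∉ buf) (hne : t ≠ c) :
    PySem.Chars.find (buf ++ c :: cs) [t] = -1 ∨ (buf.length : Int) < PySem.Chars.find (buf ++ c :: cs) [t] := by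
  by_cases h1 : PySem.Chars.find (buf ++ c :: cs) [t] = -1
  · exact Or.inl h1
  right
  have hge : 0 ≤ PySem.Chars.find (buf ++ c :: cs) [t] := by
    have := PySem.Chars.neg_one_le_find (buf ++ c :: cs) [t]; omega
  obtain ⟨hpre, hmin⟩ := PySem.Chars.find_spec (s := buf ++ c :: cs) (sub := [t]) hge
  set k := (PySem.Chars.find (buf ++ c :: cs) [t]).toNat with hk
  have hkl : (buf ++ c :: cs)[k]? = some t := by
    rw [← List.head?_drop]; exact pv_singleton_prefix.mp hpre
  have hknb : ¬ k < buf.length := by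
    intro hlt
    rw [List.getElem?_append_left hlt] at hkl
    exact h (List.mem_of_getElem? hkl)
  have hkne : k ≠ buf.length := by
    intro heq
    rw [List.getElem?_append_right (by omega)] at hkl
    simp [heq] at hkl
    exact hne hkl.symm
  omega

-- terminator bookkeeping
def pvTerms : List Char := ['.', '!', '?']

theorem pv_splitFirst_none {l : List Char} (h : ∀ t ∈ pvTerms, t ∉ l) :
    pvSplitFirst l = (none, l) := by
  rw [pvSplitFirst]
  rw [pv_find_absent (h '.' (by decide)), pv_find_absent (h '!' (by decide)), pv_find_absent (h '?' (by decide))]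
  simp

theorem pv_foldl_min {L : Int} : ∀ (xs : List Int) (x : Int), (x = L ∨ L < x) →
    (∀ y ∈ xs, y = L ∨ L < y) → (x = L ∨ L ∈ xs) → xs.foldl min x = L := by
  intro xs
  induction xs with
  | nil =>
    intro x hx _ hex
    rcases hex with h | h
    · exact h
    · simp at h
  | cons a xs ih =>
    intro x hx hall hex
    have ha := hall a (by simp)
    rw [List.foldl_cons]
    apply ih
    · omega
    · intro y hy; exact hall y (by simp [hy])
    · rcases hex with h | h
      · left; omega
      · rcases List.mem_cons.mp h with h | h
        · left; omega
        · right; exact h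

theorem pv_splitFirst_cons {c : Char} {buf cs : List Char} (hc : c ∈ pvTerms)
    (h : ∀ t ∈ pvTerms, t ∉ buf) :
    pvSplitFirst (buf ++ c :: cs) = (some (PySem.Chars.strip (buf ++ [c])), cs) := by
  have htake : PySem.List.slice (buf ++ c :: cs) none (some ((buf.length : Int) + 1)) = buf ++ [c] := by
    rw [PySem.List.slice_to _ (by omega)]
    have h1 : ((buf.length : Int) + 1).toNat = (buf ++ [c]).length := by simp
    have h2 : buf ++ c :: cs = (buf ++ [c]) ++ cs := by simp
    rw [h1, h2, List.take_left' rfl]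
  have hdrop : PySem.List.slice (buf ++ c :: cs) (some ((buf.length : Int) + 1)) none = cs := by
    rw [PySem.List.slice_from _ (by omega)]
    have h1 : ((buf.length : Int) + 1).toNat = (buf ++ [c]).length := by simp
    have h2 : buf ++ c :: cs = (buf ++ [c]) ++ cs := by simp
    rw [h1, h2, List.drop_left' rfl]
  set L : Int := (buf.length : Int) with hLdef
  have hL0 : 0 ≤ L := by positivity
  set f1 := PySem.Chars.find (buf ++ c :: cs) ['.'] with hf1
  set f2 := PySem.Chars.find (buf ++ c :: cs) ['!'] with hf2
  set f3 := PySem.Chars.find (buf ++ c :: cs) ['?'] with hf3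
  have key : ∀ f ∈ [f1, f2, f3], f = L ∨ f = -1 ∨ L < f := by
    intro f hf
    have hf' : f = f1 ∨ f = f2 ∨ f = f3 := by simpa using hf
    have : ∃ t ∈ pvTerms, f = PySem.Chars.find (buf ++ c :: cs) [t] := by
      rcases hf' with rfl | rfl | rfl
      · exact ⟨'.', by decide, hf1⟩
      · exact ⟨'!', by decide, hf2⟩
      · exact ⟨'?', by decide, hf3⟩
    obtain ⟨t, ht, rfl⟩ := this
    by_cases hteq : t = c
    · subst hteq; exact Or.inl (pv_find_append (h t ht))
    · rcases pv_find_append_other (h t ht) hteq with h0 | h0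
      · exact Or.inr (Or.inl h0)
      · exact Or.inr (Or.inr h0)
  have hmem : L ∈ [f1, f2, f3] := by
    have hcfind : PySem.Chars.find (buf ++ c :: cs) [c] = L := pv_find_append (h c hc)
    rcases (by simpa [pvTerms] using hc : c = '.' ∨ c = '!' ∨ c = '?') with rfl | rfl | rfl
    · rw [← hcfind]; simp [hf1]
    · rw [← hcfind]; simp [hf2]
    · rw [← hcfind]; simp [hf3]
  have hmemf : L ∈ ([f1, f2, f3].filter (fun i => i ≠ -1)) := by
    refine List.mem_filter.mpr ⟨hmem, by simpa using (by omega : ¬ L = -1)⟩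
  obtain ⟨x, xs, hxxs⟩ := List.exists_cons_of_ne_nil (List.ne_nil_of_mem hmemf)
  have hsub : ∀ y ∈ x :: xs, y = L ∨ L < y := by
    intro y hy
    rw [← hxxs] at hy
    have hy' := List.mem_filter.mp hy
    rcases key y hy'.1 with h0 | h0 | h0
    · exact Or.inl h0
    · exfalso; revert hy'; simp [h0]
    · exact Or.inr h0
  have hfold : xs.foldl min x = L := by
    apply pv_foldl_min
    · exact hsub x (by simp)
    · intro y hy; exact hsub y (by simp [hy])
    · rw [hxxs] at hmemf; rcases List.mem_cons.mp hmemf with h0 | h0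
      · exact Or.inl h0.symm
      · exact Or.inr h0
  rw [pvSplitFirst]
  simp only [← hf1, ← hf2, ← hf3, hxxs, hfold, htake, hdrop]

theorem pv_terms_not_space : ∀ c ∈ pvTerms, PySem.Chars.isspace c = false := by
  intro c hc
  fin_cases hc <;> rfl

theorem pv_bloop_sound : ∀ (n : Nat) (rest : List Char),
    (pvBLoop n rest).length ≤ n ∧ ∀ p ∈ pvBLoop n rest, p ≠ [] ∧ PySem.Chars.strip p = p := by
  intro n
  induction n with
  | zero => intro rest; simp [pvBLoop]
  | succ n ih =>
    intro rest
    by_cases hdw : rest.dropWhile (fun c => !(pvTerms.contains c)) = []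
    · have hno : ∀ t ∈ pvTerms, t ∉ rest := by
        intro t ht hmem
        have hall := List.dropWhile_eq_nil_iff.mp hdw
        have h1 : pvTerms.contains t = false := by simpa using hall t hmem
        have h2 : t ∈ pvTerms := ht
        rw [← List.contains_iff_mem] at h2
        rw [h1] at h2
        exact Bool.false_ne_true h2
      rw [pvBLoop, pv_splitFirst_none hno]
      by_cases hstrip : PySem.Chars.strip rest = []
      · simp [hstrip]
      · simp only [if_neg hstrip]
        refine ⟨by simp, ?_⟩
        intro p hp
        simp at hp
        subst hp
        exact ⟨hstrip, pv_strip_strip rest⟩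
    · obtain ⟨c, cs, hcs, hcf⟩ := pv_dropWhile_head _ rest hdw
      have hcterm : c ∈ pvTerms := by
        have : pvTerms.contains c = true := by simpa using hcf
        rwa [List.contains_iff_mem] at this
      have hrest : rest = rest.takeWhile (fun c => !(pvTerms.contains c)) ++ c :: cs := by
        conv_lhs => rw [← List.takeWhile_append_dropWhile (p := fun c => !(pvTerms.contains c)) (l := rest)]
        rw [hcs]
      have hbuf : ∀ t ∈ pvTerms, t ∉ rest.takeWhile (fun c => !(pvTerms.contains c)) := by
        intro t ht hmem
        have h1 : pvTerms.contains t = false := by simpa using List.mem_takeWhile_imp hmem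
        have h2 : t ∈ pvTerms := ht
        rw [← List.contains_iff_mem] at h2
        rw [h1] at h2
        exact Bool.false_ne_true h2
      rw [pvBLoop, hrest, pv_splitFirst_cons hcterm hbuf]
      obtain ⟨ihlen, ihgood⟩ := ih cs
      constructor
      · simpa using ihlen
      · intro p hp
        rcases List.mem_cons.mp hp with rfl | hp
        · have hcin : c ∈ rest.takeWhile (fun c => !(pvTerms.contains c)) ++ [c] := by simp
          exact ⟨pv_strip_ne_nil hcin (pv_terms_not_space c hcterm), pv_strip_strip _⟩
        · exact ihgood p hp

def pvFinalA (st : List (List Char) × List Char) : List (List Char) :=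
  if st.1.length < 2 ∧ PySem.Chars.strip st.2 ≠ [] then st.1 ++ [PySem.Chars.strip st.2] else st.1

theorem pv_main : ∀ (cs buf : List Char) (ss : List (List Char)),
    (∀ t ∈ pvTerms, t ∉ buf) → ss.length ≤ 1 →
    pvFinalA (pvALoop cs ss buf) = ss ++ pvBLoop (2 - ss.length) (buf ++ cs) := by
  intro cs
  induction cs with
  | nil =>
    intro buf ss hbuf hss
    obtain ⟨k, hk⟩ : ∃ k, 2 - ss.length = k + 1 := ⟨1 - ss.length, by omega⟩
    rw [pvALoop, hk, List.append_nil, pvBLoop, pv_splitFirst_none hbuf]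
    by_cases hstrip : PySem.Chars.strip buf = []
    · simp [pvFinalA, hstrip]
    · simp only [pvFinalA]
      simp only [hstrip]
      rw [if_pos ⟨by simpa using Nat.lt_of_le_of_lt hss Nat.one_lt_two, hstrip⟩]
      simp
  | cons ch cs ih =>
    intro buf ss hbuf hss
    simp only [pvALoop]
    by_cases hterm : (['.', '!', '?'] : List Char).contains ch = true
    · have hchterm : ch ∈ pvTerms := by
        rwa [List.contains_iff_mem] at hterm
      have hclean : PySem.Chars.strip (buf ++ [ch]) ≠ [] :=
        pv_strip_ne_nil (by simp) (pv_terms_not_space ch hchterm)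
      rw [if_pos hterm, if_neg hclean]
      by_cases hss1 : ss.length = 1
      · rw [if_pos (by simp [hss1])]
        have hrhs : pvBLoop (2 - ss.length) (buf ++ ch :: cs)
            = [PySem.Chars.strip (buf ++ [ch])] := by
          rw [hss1, (by rfl : 2 - 1 = 1), pvBLoop, pv_splitFirst_cons hchterm hbuf]
          simp [pvBLoop]
        rw [hrhs, pvFinalA, if_neg (fun h => h.2 rfl)]
      · have hss0 : ss = [] := by
          cases ss with
          | nil => rfl
          | cons a t => simp only [List.length_cons] at hss hss1; omega
        subst hss0
        rw [if_neg (by simp)]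
        have hih := ih [] [PySem.Chars.strip (buf ++ [ch])] (by simp) (by simp)
        show pvFinalA (pvALoop cs [PySem.Chars.strip (buf ++ [ch])] []) =
          [] ++ pvBLoop (2 - List.length ([] : List (List Char))) (buf ++ ch :: cs)
        rw [hih]
        have hrhs : pvBLoop (2 - List.length ([] : List (List Char))) (buf ++ ch :: cs)
            = PySem.Chars.strip (buf ++ [ch]) :: pvBLoop 1 cs := by
          rw [(by rfl : 2 - List.length ([] : List (List Char)) = 2), pvBLoop, pv_splitFirst_cons hchterm hbuf]
        rw [hrhs]
        norm_num
    · rw [if_neg hterm, if_neg (by simp; omega)]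
      have hbuf' : ∀ t ∈ pvTerms, t ∉ buf ++ [ch] := by
        intro t ht hmem
        rcases List.mem_append.mp hmem with h0 | h0
        · exact hbuf t ht h0
        · simp at h0
          subst h0
          have : pvTerms.contains t = true := by rw [List.contains_iff_mem]; exact ht
          exact hterm (by simpa [pvTerms] using this)
      have hih := ih (buf ++ [ch]) ss hbuf' hss
      show pvFinalA (pvALoop cs ss (buf ++ [ch])) = ss ++ pvBLoop (2 - ss.length) (buf ++ ch :: cs)
      rw [hih, List.append_assoc]
      rfl

theorem pv_strip_join_le2 (S : List (List Char)) (h2 : S.length ≤ 2)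
    (hg : ∀ p ∈ S, p ≠ [] ∧ PySem.Chars.strip p = p) :
    PySem.Chars.strip (PySem.Chars.join [' '] S) = PySem.Chars.join [' '] S := by
  match S with
  | [] => rfl
  | [a] =>
    have := hg a (by simp)
    simpa [PySem.Chars.join, List.intercalate] using this.2
  | [a, b] =>
    have ha := hg a (by simp)
    have hb := hg b (by simp)
    have hj : PySem.Chars.join [' '] [a, b] = a ++ ' ' :: b := by
      simp [PySem.Chars.join, List.intercalate]
    rw [hj]
    exact pv_strip_join2 ha.1 ha.2 hb.1 hb.2
  | a :: b :: c :: t => simp at h2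


-- ===== VERDICT (by name: the statement is the Claim_ definition above) =====
theorem trim_dashboard_health_text_py_spec : Claim_equal_trim_dashboard_health_text_py := by
  unfold Claim_equal_trim_dashboard_health_text_py
  intro value _
  unfold Spec_trim_dashboard_health_text_py
  cases value with
  | none => rfl
  | some v =>
    simp only [trim_dashboard_health_text_py, trim_dashboard_health_text_py_alt]
    by_cases hv : v.toList = []
    · simp [hv]
    · rw [if_neg hv, if_neg hv]
      set N := PySem.Chars.join [' '] (PySem.Chars.split₀ v.toList) with hN
      obtain ⟨hlen, hgood⟩ := pv_bloop_sound 2 N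
      have hmain := pv_main N [] [] (by simp) (by simp)
      simp only [List.nil_append, List.length_nil, Nat.sub_zero] at hmain
      have hA : (if (pvALoop N [] []).1.length < 2 ∧ PySem.Chars.strip (pvALoop N [] []).2 ≠ []
          then (pvALoop N [] []).1 ++ [PySem.Chars.strip (pvALoop N [] []).2]
          else (pvALoop N [] []).1) = pvBLoop 2 N := hmain
      rw [hA]
      have hslice : PySem.List.slice (pvBLoop 2 N) none (some 2) = pvBLoop 2 N := by
        rw [PySem.List.slice_to _ (by omega)]
        exact List.take_of_length_le hlen
      rw [hslice, pv_strip_join_le2 _ hlen hgood]
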